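-- pv_equiv track=rewrite | github.com/ofekshmu/AppliedBusinessAnalytics | src/Ex3_317991735.py | get_highest_average_column
-- ===== SOURCE A (Python) =====
-- def get_highest_average_column(mat):
--     index = 1
--     max_avg = 0
--     initial_avg = True
--     for j in range(len(mat[0])):
--         avg = 0
--         for i in range(len(mat)):
--             avg += mat[i][j]
--         if max_avg <= avg or initial_avg:
--             initial_avg = False
--             max_avg = avg
--             index = j + 1
--     return index
-- ===== SOURCE B (Python) =====
-- def get_highest_average_column(mat):
--     sums = [0] * len(mat[0])
--     for row in mat:
--         sums = [s + v for s, v in zip(sums, row)]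
--     if not sums:
--         return 1
--     best = max(sums)
--     return len(sums) - sums[::-1].index(best)
-- ===== Notes on version B (the rewrite author's own statement) =====
-- stated objective: alternative
-- what changed: Replaces the column-major nested loops with running max/flag state by a row-major zip accumulation of column sums followed by max() plus a reversed-list index to pick the last maximal column.
import Mathlib
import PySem

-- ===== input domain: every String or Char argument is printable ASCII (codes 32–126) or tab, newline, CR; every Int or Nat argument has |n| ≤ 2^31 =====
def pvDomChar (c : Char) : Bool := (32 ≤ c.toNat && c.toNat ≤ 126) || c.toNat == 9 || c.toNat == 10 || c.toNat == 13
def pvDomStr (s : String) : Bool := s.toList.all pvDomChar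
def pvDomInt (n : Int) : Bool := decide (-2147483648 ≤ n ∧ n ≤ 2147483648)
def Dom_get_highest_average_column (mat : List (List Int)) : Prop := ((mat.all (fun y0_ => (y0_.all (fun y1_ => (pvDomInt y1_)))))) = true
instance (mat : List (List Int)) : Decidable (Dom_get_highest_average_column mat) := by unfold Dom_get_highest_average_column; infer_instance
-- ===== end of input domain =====

-- B accumulates column sums row-major with zip and then selects the last maximal column
-- via max() and a reversed index, instead of A's column-major nested loops with a
-- running max / initial flag; same cost, different decomposition.

-- ===== PORT A =====
def get_highest_average_column (mat : List (List Int)) : Int :=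
  match PySem.List.pyGet? mat 0 with
  | none => 0   -- mat[0] IndexError on empty mat; excluded by Pre_
  | some row0 =>
    (((PySem.List.pyRange 0 (row0.length : Int) 1).foldl
      (fun (st : Int × Int × Bool) j =>
        let avg : Int := (PySem.List.pyRange 0 (mat.length : Int) 1).foldl
          (fun a i => a + PySem.List.pyGetD (PySem.List.pyGetD mat i []) j 0) 0
        if st.2.1 ≤ avg ∨ st.2.2 then (j + 1, avg, false) else st)
      (1, 0, true)) : Int × Int × Bool).1

-- ===== PORT B =====
def get_highest_average_column_alt (mat : List (List Int)) : Int :=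
  match PySem.List.pyGet? mat 0 with
  | none => 0   -- len(mat[0]) IndexError on empty mat; excluded by Pre_
  | some row0 =>
    let sums := mat.foldl (fun (s : List Int) row => List.zipWith (fun a b => a + b) s row)
                  (List.replicate row0.length (0 : Int))
    if sums.isEmpty then 1
    else
      match PySem.List.max? sums (fun x => x) with
      | none => 1   -- unreachable: sums nonempty
      | some best =>
        -- sums[::-1] is sums.reverse (PySem.List.slice?_none_none_neg_one)
        match PySem.List.index? sums.reverse best with
        | none => 0   -- unreachable: best ∈ sums
        | some k => (sums.length : Int) - (k : Int)

-- ===== PRECONDITION & SPEC =====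
-- Pre_ excludes exactly the inputs where A raises IndexError: the empty matrix
-- (mat[0]) and matrices with some row shorter than the first row (mat[i][j]).
def Pre_get_highest_average_column (mat : List (List Int)) : Prop :=
  mat ≠ [] ∧ ∀ row ∈ mat, (mat.headD []).length ≤ row.length
instance (mat : List (List Int)) : Decidable (Pre_get_highest_average_column mat) := by
  unfold Pre_get_highest_average_column; infer_instance
def pvWitness_get_highest_average_column : List (List Int) := [[1, 2], [3, 4]]

def Spec_get_highest_average_column (mat : List (List Int)) (out : Int) : Prop := out = get_highest_average_column_alt mat
instance (mat : List (List Int)) (out : Int) : Decidable (Spec_get_highest_average_column mat out) := by unfold Spec_get_highest_average_column; infer_instance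

-- ===== CLAIM (what is proved, stated in full; the proofs are below) =====
def Claim_equal_get_highest_average_column : Prop := ∀ (mat : List (List Int)), Dom_get_highest_average_column mat → Pre_get_highest_average_column mat → Spec_get_highest_average_column mat (get_highest_average_column mat)

-- ===== LEMMAS AND PROOFS =====

-- running max of a nonempty list, as both A's loop and Python's max() compute it
def pmax : List Int → Int
  | [] => 0
  | x :: t => t.foldl max x

theorem pmax_append (L : List Int) (hL : L ≠ []) (x : Int) :
    pmax (L ++ [x]) = max (pmax L) x := by
  match L with
  | [] => exact absurd rfl hL
  | y :: t => simp [pmax, List.foldl_append]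

theorem pmax_mem (L : List Int) (hL : L ≠ []) : pmax L ∈ L := by
  match L with
  | [] => exact absurd rfl hL
  | y :: t => exact PySem.List.max?_mem (PySem.List.max?_id_cons y t)

-- A's selection loop over indices 0..L.length-1, reading column sums through f,
-- ends with index = L.length - (position of the last maximum), max = pmax L, flag = false.
theorem selectA_spec (L : List Int) (hL : L ≠ []) (f : Int → Int)
    (hf : ∀ (k : Nat), k < L.length → f (k : Int) = L.getD k 0) :
    ((PySem.List.pyRange 0 (L.length : Int) 1).foldl
      (fun (st : Int × Int × Bool) j =>
        let avg : Int := f j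
        if st.2.1 ≤ avg ∨ st.2.2 then (j + 1, avg, false) else st)
      (1, 0, true))
    = ((L.length : Int) - (L.reverse.idxOf (pmax L) : Int), pmax L, false) := by
  induction L using List.reverseRecOn with
  | nil => exact absurd rfl hL
  | append_singleton L x ih =>
    rcases eq_or_ne L [] with rfl | hLnil
    · have h0 := hf 0 (by simp)
      have hr : PySem.List.pyRange 0 ((([] : List Int) ++ [x]).length : Int) 1 = [0] := by
        have h01 : ((([] : List Int) ++ [x]).length : Int) = 0 + 1 := by simp
        rw [h01, PySem.List.pyRange_one_singleton]
      rw [hr]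
      simp only [List.foldl_cons, List.foldl_nil]
      norm_num [pmax, List.getD] at h0 ⊢
      simp [h0]
    · have hlen' : (((L ++ [x]).length : Nat) : Int) = (L.length : Int) + 1 := by push_cast; simp
      rw [hlen', PySem.List.pyRange_one_succ_right (by positivity), List.foldl_append]
      have hf' : ∀ (k : Nat), k < L.length → f (k : Int) = L.getD k 0 := by
        intro k hk
        rw [hf k (by simp; omega)]
        simp [List.getD, List.getElem?_append_left hk]
      rw [ih hLnil hf']
      have hx : f (L.length : Int) = x := by
        rw [hf L.length (by simp)]
        simp [List.getD]
      by_cases hc : pmax L ≤ x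
      · simp only [List.foldl_cons, List.foldl_nil, hx]
        rw [if_pos (Or.inl hc)]
        rw [pmax_append L hLnil x, max_eq_right hc]
        have hrev : (L ++ [x]).reverse = x :: L.reverse := by simp
        rw [hrev, List.idxOf_cons_self]
        simp
      · simp only [List.foldl_cons, List.foldl_nil, hx]
        rw [if_neg (by simp [hc])]
        rw [pmax_append L hLnil x, max_eq_left (le_of_not_ge hc)]
        have hne : x ≠ pmax L := fun h => hc (le_of_eq h.symm)
        have hidx : (L ++ [x]).reverse.idxOf (pmax L) = L.reverse.idxOf (pmax L) + 1 := by
          simp [List.idxOf_cons, hne]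
        rw [hidx]
        have h1 : ((L.length : Nat) : Int) - (L.reverse.idxOf (pmax L) : Int)
            = ((L.length : Nat) : Int) + 1 - ((L.reverse.idxOf (pmax L) + 1 : Nat) : Int) := by
          push_cast; ring
        rw [h1]

-- B's row-major zip accumulation computes the column sums pointwise
theorem zipfold_spec (rows : List (List Int)) (init : List Int)
    (h : ∀ r ∈ rows, init.length ≤ r.length) :
    rows.foldl (fun (s : List Int) row => List.zipWith (fun a b => a + b) s row) init
      = (List.range init.length).map
          (fun k => init.getD k 0 + (rows.map (fun r => r.getD k 0)).sum) := by
  induction rows generalizing init with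
  | nil =>
    apply List.ext_getElem (by simp)
    intro k h1 h2
    simp only [List.foldl_nil] at h1 ⊢
    simp [List.getD, List.getElem?_eq_getElem h1]
  | cons r rows ih =>
    simp only [List.foldl_cons]
    have hr : init.length ≤ r.length := h r (by simp)
    have hzlen : (List.zipWith (fun a b => a + b) init r).length = init.length := by
      simp [hr]
    rw [ih _ (by intro r' hr'; rw [hzlen]; exact h r' (by simp [hr']))]
    rw [hzlen]
    apply List.map_congr_left
    intro k hk
    simp only [List.mem_range] at hk
    have hz : (List.zipWith (fun a b => a + b) init r).getD k 0 =
        init.getD k 0 + r.getD k 0 := by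
      have h1 : k < (List.zipWith (fun a b => a + b) init r).length := by rw [hzlen]; exact hk
      simp [List.getD, List.getElem?_eq_getElem, h1, hk, lt_of_lt_of_le hk hr]
    rw [hz]
    simp only [List.map_cons, List.sum_cons]
    ring

-- A's inner column loop is the sum of the column's entries
theorem foldl_add_pyGetD (rows : List (List Int)) (k : Nat) (a : Int) :
    rows.foldl (fun (acc : Int) (r : List Int) => acc + PySem.List.pyGetD r (k : Int) 0) a
      = a + (rows.map (fun r => r.getD k 0)).sum := by
  induction rows generalizing a with
  | nil => simp
  | cons r t ih =>
    rw [List.foldl_cons, ih]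
    simp only [List.map_cons, List.sum_cons, PySem.List.pyGetD_natCast]
    ring

-- ===== VERDICT (by name: the statement is the Claim_ definition above) =====
theorem get_highest_average_column_spec : Claim_equal_get_highest_average_column := by
  intro mat _ hpre
  obtain ⟨hne, hrows⟩ := hpre
  match hm : mat with
  | [] => exact absurd rfl hne
  | r0 :: rest =>
    unfold Spec_get_highest_average_column get_highest_average_column get_highest_average_column_alt
    simp only [PySem.List.pyGet?_zero_cons]
    set rows := r0 :: rest with hrowsdef
    have hlen : ∀ r ∈ rows, r0.length ≤ r.length := by
      intro r hr; simpa using hrows r hr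
    have hsums := zipfold_spec rows (List.replicate r0.length (0 : Int))
      (by intro r hr; simpa using hlen r hr)
    rw [List.length_replicate] at hsums
    set L := rows.foldl (fun (s : List Int) row => List.zipWith (fun a b => a + b) s row)
      (List.replicate r0.length (0 : Int)) with hLdef
    have hLform : L = (List.range r0.length).map
        (fun k => (rows.map (fun r => r.getD k 0)).sum) := by
      rw [hsums]; apply List.map_congr_left; intro k hk
      simp [List.getD, List.getElem?_replicate, List.mem_range.mp hk]
    have hLlen : L.length = r0.length := by rw [hLform]; simp
    by_cases h0 : r0.length = 0
    · -- no columns: A's loop is empty and returns 1; B returns 1 from the empty check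
      have hL0 : L.isEmpty = true := by rw [List.isEmpty_iff, hLform, h0]; simp
      rw [if_pos hL0]
      have hc0 : ((r0.length : Nat) : Int) = 0 := by rw [h0]; rfl
      rw [hc0, PySem.List.pyRange_one_eq_nil (le_refl (0 : Int))]
      simp
    · have hLne : L ≠ [] := by
        intro h; rw [h] at hLlen; exact h0 hLlen.symm
      -- A's inner loop computes column k's sum, which is L[k]
      have hf : ∀ (k : Nat), k < L.length → ((PySem.List.pyRange 0 (rows.length : Int) 1).foldl
          (fun a i => a + PySem.List.pyGetD (PySem.List.pyGetD rows i []) (k : Int) 0) 0)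
          = L.getD k 0 := by
        intro k hk
        rw [hLlen] at hk
        have hpr := PySem.List.foldl_pyRange_pyGetD (xs := rows) (d := ([] : List Int))
          (f := fun (a : Int) (r : List Int) => a + PySem.List.pyGetD r (k : Int) 0)
          (init := (0 : Int)) (a := 0) (le_refl 0)
        simp only [Int.toNat_zero, List.drop_zero, PySem.List.len] at hpr
        rw [hpr, foldl_add_pyGetD, hLform]
        simp [List.getD, List.getElem?_map, List.getElem?_range hk]
      have hLlenInt : ((r0.length : Nat) : Int) = (L.length : Int) := by exact_mod_cast hLlen.symm
      rw [hLlenInt]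
      rw [selectA_spec L hLne
        (fun j => (PySem.List.pyRange 0 (rows.length : Int) 1).foldl
          (fun a i => a + PySem.List.pyGetD (PySem.List.pyGetD rows i []) j 0) 0) hf]
      rw [if_neg (by simp [List.isEmpty_iff, hLne])]
      cases hLcases : L with
      | nil => exact absurd hLcases hLne
      | cons y t =>
        have hbm : t.foldl max y ∈ (y :: t).reverse :=
          List.mem_reverse.mpr (pmax_mem (y :: t) (by simp))
        cases hidx2 : PySem.List.index? (y :: t).reverse (t.foldl max y) with
        | none =>
          rw [PySem.List.index?_eq_none_iff] at hidx2
          exact absurd hbm hidx2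
        | some k =>
          have h3 : List.idxOf? (t.foldl max y) (y :: t).reverse = some k := by
            rw [← PySem.List.index?_eq_idxOf?]; exact hidx2
          have hk : List.idxOf (t.foldl max y) (y :: t).reverse = k := by
            rw [List.idxOf_eq_getD_idxOf?, h3]; rfl
          simp only [PySem.List.max?_id_cons, hidx2]
          show ((y :: t).length : Int) - (List.idxOf (t.foldl max y) (y :: t).reverse : Int)
              = ((y :: t).length : Int) - (k : Int)
          rw [hk]
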